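-- pv_equiv track=rewrite | github.com/raghavagps/FluSPred | getDPC.py | get_dpc
-- ===== SOURCE A (Python) =====
-- from itertools import permutations
--
-- def get_dpc(sequence):
--   unique_amino_acids = list(set(sequence))
--   #get permutations
--   total_dpc_permutation = list(permutations(unique_amino_acids,2))
--   #adding the permutation of an amino acid with itself
--   for amino_acid in unique_amino_acids:
--     total_dpc_permutation.append((amino_acid,amino_acid))
--   #the list is a list of tuples, converting to a list of strings
--   final_dpc_columns = []
--   for dpc_perm in total_dpc_permutation:
--     final_dpc_columns.append("".join(dpc_perm))
--   dpc_freq = {}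
--   for dpc in final_dpc_columns:
--     dpc_freq[dpc] = sequence.count(dpc)
--
--   return dpc_freq
-- ===== SOURCE B (Python) =====
-- def get_dpc(sequence):
--   # One pass over the sequence: count each adjacent distinct pair directly, and
--   # pair up equal neighbours greedily (an 'avail' flag) to reproduce Python's
--   # non-overlapping str.count for the doubled-letter keys; then fill the key
--   # table from that counter instead of scanning the sequence once per key.
--   cnt = {}
--   prev = None
--   avail = False
--   for ch in sequence:
--     if prev is None:
--       avail = True
--     elif ch == prev:
--       if avail:
--         key = ch + ch
--         cnt[key] = cnt.get(key, 0) + 1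
--         avail = False
--       else:
--         avail = True
--     else:
--       key = prev + ch
--       cnt[key] = cnt.get(key, 0) + 1
--       avail = True
--     prev = ch
--   unique = list(dict.fromkeys(sequence))
--   dpc_freq = {}
--   for a in unique:
--     for b in unique:
--       if b != a:
--         dpc_freq[a + b] = cnt.get(a + b, 0)
--   for a in unique:
--     dpc_freq[a + a] = cnt.get(a + a, 0)
--   return dpc_freq
-- ===== Notes on version B (the rewrite author's own statement) =====
-- stated objective: alternative
-- what changed: Instead of scanning the sequence once per key (sequence.count for each of the k^2 dipeptide keys), B makes a single left-to-right pass that counts adjacent pairs, pairing equal neighbours greedily to reproduce str.count's non-overlapping semantics for doubled-letter keys, and then fills the key table from that counter.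
import Mathlib
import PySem

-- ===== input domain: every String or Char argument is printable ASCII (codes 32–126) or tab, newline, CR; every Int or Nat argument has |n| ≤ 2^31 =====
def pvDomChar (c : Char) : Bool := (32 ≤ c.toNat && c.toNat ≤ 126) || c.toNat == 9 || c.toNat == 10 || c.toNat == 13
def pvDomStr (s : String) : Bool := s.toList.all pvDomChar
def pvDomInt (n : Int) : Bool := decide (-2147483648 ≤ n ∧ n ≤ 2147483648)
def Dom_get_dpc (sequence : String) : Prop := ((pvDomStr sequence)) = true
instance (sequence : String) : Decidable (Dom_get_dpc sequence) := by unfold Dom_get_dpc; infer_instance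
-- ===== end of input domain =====

-- B replaces A's per-key scans of the sequence (sequence.count once per key) by a single
-- left-to-right pass that counts adjacent pairs, pairing equal neighbours greedily; same dict,
-- same key order (the Lean ports both use first-occurrence order for Python's unordered set(sequence)).

-- ===== PORT A =====
def get_dpc (sequence : String) : List (String × Int) :=
  -- list(set(sequence)) — CPython's set order is hash-dependent; the port uses first-occurrence order
  -- (dict outputs are compared as key→value maps, ignoring order)
  let unique_amino_acids := PySem.Set.ofList sequence.toList
  -- list(permutations(unique_amino_acids, 2)) then appending (c, c) for each c
  let total_dpc_permutation :=
    PySem.List.permutations unique_amino_acids 2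
      ++ unique_amino_acids.map (fun amino_acid => [amino_acid, amino_acid])
  -- "".join(dpc_perm) of a tuple of 1-char strings = the string of those chars
  let final_dpc_columns := total_dpc_permutation.map (fun dpc_perm => String.ofList dpc_perm)
  -- dpc_freq[dpc] = sequence.count(dpc)
  let dpc_freq := final_dpc_columns.foldl
    (fun d dpc => d.insert dpc ((PySem.Str.count sequence dpc : Int))) PySem.Dict.empty
  dpc_freq.items

-- ===== PORT B =====
-- one step of B's single pass: state = (prev char, avail flag, counter dict)
def pvBStep (st : Option Char × Bool × PySem.Dict String Int) (ch : Char) :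
    Option Char × Bool × PySem.Dict String Int :=
  match st with
  | (none, _, cnt) => (some ch, true, cnt)
  | (some prev, avail, cnt) =>
    if ch = prev then
      if avail then
        let key := String.ofList [ch, ch]
        (some ch, false, cnt.insert key (cnt.getD key 0 + 1))
      else (some ch, true, cnt)
    else
      let key := String.ofList [prev, ch]
      (some ch, true, cnt.insert key (cnt.getD key 0 + 1))

def get_dpc_alt (sequence : String) : List (String × Int) :=
  let cnt := (sequence.toList.foldl pvBStep (none, false, PySem.Dict.empty)).2.2
  let unique := PySem.List.dedup sequence.toList
  let d1 := unique.foldl (fun d a =>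
    unique.foldl (fun d b =>
      if b ≠ a then d.insert (String.ofList [a, b]) (cnt.getD (String.ofList [a, b]) 0) else d) d)
    PySem.Dict.empty
  let d2 := unique.foldl (fun d a =>
    d.insert (String.ofList [a, a]) (cnt.getD (String.ofList [a, a]) 0)) d1
  d2.items

-- ===== PRECONDITION & SPEC =====
def Spec_get_dpc (sequence : String) (out : List (String × Int)) : Prop := out = get_dpc_alt sequence
instance (sequence : String) (out : List (String × Int)) : Decidable (Spec_get_dpc sequence out) := by unfold Spec_get_dpc; infer_instance

-- ===== CLAIM (what is proved, stated in full; the proofs are below) =====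
def Claim_equal_get_dpc : Prop := ∀ (sequence : String), Dom_get_dpc sequence → Spec_get_dpc sequence (get_dpc sequence)

-- ===== LEMMAS AND PROOFS =====

-- Python's non-overlapping count of the 2-char pattern [a, b]: greedy left-to-right
def pcnt (a b : Char) : List Char → Nat
  | [] => 0
  | [_] => 0
  | x :: y :: t => if x = a ∧ y = b then pcnt a b t + 1 else pcnt a b (y :: t)

lemma pcnt_cons_ne (a b x : Char) (l : List Char) (h : x ≠ a) : pcnt a b (x :: l) = pcnt a b l := by
  cases l with
  | nil => rfl
  | cons y t => simp [pcnt, h]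

lemma count_go_nil (sub : List Char) (fuel acc : Nat) :
    PySem.Chars.count.go sub fuel [] acc = acc := by
  cases fuel <;> simp [PySem.Chars.count.go]

lemma count_go_eq (a b : Char) : ∀ (fuel : Nat) (l : List Char) (acc : Nat), l.length ≤ fuel →
    PySem.Chars.count.go [a, b] fuel l acc = acc + pcnt a b l := by
  intro fuel
  induction fuel with
  | zero =>
    intro l acc h
    have : l = [] := List.length_eq_zero_iff.mp (Nat.le_zero.mp h)
    subst this
    simp [count_go_nil, pcnt]
  | succ n ih =>
    intro l acc h
    match l with
    | [] => simp [count_go_nil, pcnt]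
    | [x] =>
      rw [PySem.Chars.count.go]
      rw [if_neg (by simp [List.isPrefixOf])]
      rw [count_go_nil]
      simp [pcnt]
    | x :: y :: t =>
      rw [PySem.Chars.count.go]
      simp only [List.isPrefixOf, Bool.and_true, List.length_cons, List.drop_succ_cons]
      by_cases hx : a = x
      · by_cases hy : b = y
        · subst hx; subst hy
          rw [if_pos (by simp)]
          rw [List.length_cons, List.length_cons] at h
          simp only [List.length_nil, List.drop_zero]
          rw [ih t (acc + 1) (by omega)]
          simp [pcnt]
          omega
        · rw [if_neg (by simp [hy])]
          rw [List.length_cons] at h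
          rw [ih (y :: t) acc (by simp only [List.length_cons] at h ⊢; omega)]
          have hc : ¬ (x = a ∧ y = b) := by rintro ⟨_, h2⟩; exact hy h2.symm
          simp [pcnt, hc]
      · rw [if_neg (by simp [hx])]
        rw [List.length_cons] at h
        rw [ih (y :: t) acc (by simp only [List.length_cons] at h ⊢; omega)]
        have hc : ¬ (x = a ∧ y = b) := by rintro ⟨h1, _⟩; exact hx h1.symm
        simp [pcnt, hc]

lemma count_eq_pcnt (a b : Char) (l : List Char) : PySem.Chars.count l [a, b] = pcnt a b l := by
  rw [PySem.Chars.count]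
  rw [if_neg (by simp)]
  simpa using count_go_eq a b l.length l 0 le_rfl

-- pure model of the increments B's pass makes to the key [a, b], from state (prev, avail)
def bcount (a b p : Char) (avail : Bool) : List Char → Nat
  | [] => 0
  | c :: t =>
    if c = p then
      if avail then (if c = a ∧ c = b then 1 else 0) + bcount a b c false t
      else bcount a b c true t
    else (if p = a ∧ c = b then 1 else 0) + bcount a b c true t

lemma ofList_pair_inj (x y z w : Char) :
    String.ofList [x, y] = String.ofList [z, w] ↔ x = z ∧ y = w := by
  rw [String.ofList_inj]
  simp

lemma bcount_eq_pcnt (a b : Char) : ∀ (l : List Char) (p : Char) (avail : Bool),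
    bcount a b p avail l = if a = b ∧ avail = false then pcnt a b l else pcnt a b (p :: l) := by
  intro l
  induction l with
  | nil => intro p avail; simp only [bcount]; split <;> simp [pcnt]
  | cons c t ih =>
    intro p avail
    simp only [bcount, ih]
    by_cases hcp : c = p <;> by_cases hab : a = b <;> cases avail <;>
        by_cases hpa : p = a <;> by_cases hcb : c = b <;>
      simp_all [pcnt, pcnt_cons_ne] <;> omega

lemma foldB_getD (a b : Char) : ∀ (l : List Char) (p : Char) (avail : Bool) (d : PySem.Dict String Int),
    ((l.foldl pvBStep (some p, avail, d)).2.2).getD (String.ofList [a, b]) 0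
      = d.getD (String.ofList [a, b]) 0 + (bcount a b p avail l : Int) := by
  intro l
  induction l with
  | nil => intro p avail d; simp [bcount]
  | cons c t ih =>
    intro p avail d
    simp only [List.foldl_cons]
    by_cases hcp : c = p
    · subst hcp
      cases avail with
      | true =>
        simp only [pvBStep, if_true]
        rw [ih, PySem.Dict.getD_insert]
        simp only [bcount]
        by_cases hk : a = c ∧ b = c
        · obtain ⟨rfl, rfl⟩ := hk
          rw [if_pos rfl]
          push_cast
          simp only [and_self, if_true]
          omega
        · rw [if_neg (by simp only [ofList_pair_inj]; rintro ⟨h1, h2⟩; exact hk ⟨h1, h2⟩)]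
          have : ¬ (c = a ∧ c = b) := by rintro ⟨h1, h2⟩; exact hk ⟨h1.symm, h2.symm⟩
          simp only [if_neg this]
          push_cast
          ring
      | false =>
        simp only [pvBStep, if_true, Bool.false_eq_true,
          if_false]
        rw [ih]
        simp only [bcount]
        norm_num
    · simp only [pvBStep, if_neg hcp]
      rw [ih, PySem.Dict.getD_insert]
      simp only [bcount, if_neg hcp]
      by_cases hk : a = p ∧ b = c
      · obtain ⟨rfl, rfl⟩ := hk
        rw [if_pos rfl]
        push_cast
        simp only [and_self, if_true]
        omega
      · rw [if_neg (by simp only [ofList_pair_inj]; rintro ⟨h1, h2⟩; exact hk ⟨h1, h2⟩)]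
        have : ¬ (p = a ∧ c = b) := by rintro ⟨h1, h2⟩; exact hk ⟨h1.symm, h2.symm⟩
        simp only [if_neg this]
        push_cast
        ring

-- B's one-pass counter agrees with Python's str.count on every 2-char key
lemma cnt_getD_eq_count (s : List Char) (a b : Char) :
    ((s.foldl pvBStep (none, false, PySem.Dict.empty)).2.2).getD (String.ofList [a, b]) 0
      = (PySem.Chars.count s [a, b] : Int) := by
  cases s with
  | nil => simp [count_eq_pcnt, pcnt, PySem.Dict.getD_empty]
  | cons c t =>
    simp only [List.foldl_cons, pvBStep]
    rw [foldB_getD, PySem.Dict.getD_empty, bcount_eq_pcnt]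
    simp [count_eq_pcnt]

-- itertools.permutations, arity 2, over a duplicate-free list
lemma perm_succ (xs : List Char) (r : Nat) : PySem.List.permutations xs (r+1) =
    (List.range xs.length).flatMap (fun i => match xs[i]? with
      | none => []
      | some x => (PySem.List.permutations (xs.eraseIdx i) r).map (fun p => x :: p)) := by
  conv_lhs => rw [PySem.List.permutations]
  refine congrArg (fun f => List.flatMap f (List.range xs.length)) ?_
  funext i
  cases xs[i]? <;> rfl

lemma flat_range {β : Type} (xs : List Char) (f : Char → List β) :
    (List.range xs.length).flatMap (fun i => match xs[i]? with
      | none => ([] : List β)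
      | some x => f x) = xs.flatMap f := by
  induction xs with
  | nil => simp
  | cons c t ih =>
    rw [List.length_cons, List.range_succ_eq_map, List.flatMap_cons, List.flatMap_map]
    simp only [List.getElem?_cons_zero, List.getElem?_cons_succ]
    rw [List.flatMap_cons]
    exact congrArg (f c ++ ·) ih

lemma perm_one (xs : List Char) : PySem.List.permutations xs 1 = xs.map (fun a => [a]) := by
  rw [perm_succ]
  have : ∀ i, (match xs[i]? with
      | none => ([] : List (List Char))
      | some x => (PySem.List.permutations (xs.eraseIdx i) 0).map (fun p => x :: p))
      = (match xs[i]? with | none => [] | some x => [[x]]) := by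
    intro i; cases xs[i]? <;> rfl
  simp only [this]
  rw [flat_range xs (fun x => [[x]])]
  induction xs <;> simp_all

lemma eraseIdx_eq_filter : ∀ (xs : List Char), xs.Nodup →
    ∀ (i : Nat) (h : i < xs.length), xs.eraseIdx i = xs.filter (fun b => decide (b ≠ xs[i])) := by
  intro xs
  induction xs with
  | nil => intro _ i h; simp at h
  | cons x t ih =>
    intro hn i h
    rw [List.nodup_cons] at hn
    cases i with
    | zero =>
      simp only [List.eraseIdx_cons_zero, List.getElem_cons_zero, List.filter_cons]
      rw [if_neg (by simp)]
      exact (List.filter_eq_self.mpr (fun b hb => by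
        simp only [decide_eq_true_eq]
        rintro rfl
        exact hn.1 hb)).symm
    | succ i =>
      rw [List.length_cons] at h
      have hi : i < t.length := by omega
      simp only [List.eraseIdx_cons_succ, List.getElem_cons_succ, List.filter_cons]
      rw [if_pos (by
        simp only [decide_eq_true_eq]
        intro heq
        exact hn.1 (by rw [heq]; exact t.getElem_mem hi))]
      rw [ih hn.2 i hi]
      rfl

lemma flatMap_congr_mem {α β : Type} (l : List α) (f g : α → List β)
    (h : ∀ x ∈ l, f x = g x) : l.flatMap f = l.flatMap g := by
  induction l with
  | nil => rfl
  | cons x t ih => simp_all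

lemma perm_two (xs : List Char) (hn : xs.Nodup) : PySem.List.permutations xs 2 =
    xs.flatMap (fun a => (xs.filter (fun b => decide (b ≠ a))).map (fun b => [a, b])) := by
  rw [perm_succ]
  rw [flatMap_congr_mem _ _ (fun i => match xs[i]? with
      | none => []
      | some x => (xs.filter (fun b => decide (b ≠ x))).map (fun b => [x, b])) ?_]
  · exact flat_range xs _
  · intro i hi
    rw [List.mem_range] at hi
    show _ = match xs[i]? with
      | none => ([] : List (List Char))
      | some x => (xs.filter (fun b => decide (b ≠ x))).map (fun b => [x, b])
    rw [List.getElem?_eq_getElem hi]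
    simp only
    rw [perm_one, eraseIdx_eq_filter xs hn i hi, List.map_map]
    rfl

-- the distinct-pair keys, as built in order by both ports
def pairKeys (u : List Char) : List String :=
  u.flatMap (fun a => (u.filter (fun b => decide (b ≠ a))).map (fun b => String.ofList [a, b]))

lemma pairKeys_nodup (u : List Char) (hn : u.Nodup) : (pairKeys u).Nodup := by
  rw [pairKeys, List.nodup_flatMap]
  constructor
  · intro a _
    refine List.Nodup.map ?_ (hn.filter _)
    intro b1 b2 hbb
    exact ((ofList_pair_inj a b1 a b2).mp hbb).2
  · refine List.Pairwise.imp ?_ hn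
    intro a a' haa
    rw [Function.onFun, List.disjoint_left]
    intro k hk hk'
    rw [List.mem_map] at hk hk'
    obtain ⟨b1, _, hb1⟩ := hk
    obtain ⟨b2, _, hb2⟩ := hk'
    rw [← hb1] at hb2
    exact haa ((ofList_pair_inj a b1 a' b2).mp hb2.symm).1

lemma diagKeys_nodup (u : List Char) (hn : u.Nodup) :
    (u.map (fun a => String.ofList [a, a])).Nodup := by
  refine List.Nodup.map ?_ hn
  intro a1 a2 h
  exact ((ofList_pair_inj a1 a1 a2 a2).mp h).1

lemma pair_diag_disjoint (u : List Char) :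
    ∀ k ∈ pairKeys u, k ∉ u.map (fun a => String.ofList [a, a]) := by
  intro k hk hk'
  rw [pairKeys, List.mem_flatMap] at hk
  rw [List.mem_map] at hk'
  obtain ⟨a, _, hb⟩ := hk
  rw [List.mem_map] at hb
  obtain ⟨b, hbmem, hb2⟩ := hb
  obtain ⟨c, _, hc⟩ := hk'
  rw [← hb2] at hc
  obtain ⟨h1, h2⟩ := (ofList_pair_inj c c a b).mp hc
  rw [List.mem_filter] at hbmem
  have hba : b ≠ a := by simpa using hbmem.2
  exact hba (by rw [← h2, h1])


-- A's dict, listed out: distinct-pair keys in permutation order, then the doubled keys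
lemma itemsA (s : String) :
    get_dpc s = (PySem.Set.ofList s.toList).flatMap (fun a =>
        ((PySem.Set.ofList s.toList).filter (fun b => decide (b ≠ a))).map (fun b =>
          (String.ofList [a, b], (PySem.Str.count s (String.ofList [a, b]) : Int))))
      ++ (PySem.Set.ofList s.toList).map (fun a =>
          (String.ofList [a, a], (PySem.Str.count s (String.ofList [a, a]) : Int))) := by
  simp only [get_dpc]
  have hn : (PySem.Set.ofList s.toList).Nodup := PySem.Set.nodup_ofList s.toList
  set u := PySem.Set.ofList s.toList with hu
  rw [perm_two u hn]
  have hcols : (u.flatMap (fun a => (u.filter (fun b => decide (b ≠ a))).map (fun b => [a, b]))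
      ++ u.map (fun a => [a, a])).map (fun l => String.ofList l)
      = pairKeys u ++ u.map (fun a => String.ofList [a, a]) := by
    rw [List.map_append, List.map_flatMap, List.map_map, pairKeys]
    congr 1
    refine flatMap_congr_mem _ _ _ ?_
    intro a _
    rw [List.map_map]
    rfl
  rw [hcols]
  have hnodup : (pairKeys u ++ u.map (fun a => String.ofList [a, a])).Nodup := by
    rw [List.nodup_append]
    exact ⟨pairKeys_nodup u hn, diagKeys_nodup u hn,
      fun k hk k' hk' he => pair_diag_disjoint u k hk (he ▸ hk')⟩
  rw [PySem.Dict.items_foldl_insert_fresh _ (fun c => c)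
    (fun c => (PySem.Str.count s c : Int)) PySem.Dict.empty
    (fun a _ => PySem.Dict.contains_empty a) (by simpa using hnodup)]
  rw [show (PySem.Dict.empty (κ := String) (ν := Int)).items = [] from rfl, List.nil_append]
  rw [List.map_append, pairKeys, List.map_flatMap]
  congr 1
  · refine flatMap_congr_mem _ _ _ ?_
    intro a _
    rw [List.map_map]
    rfl
  · rw [List.map_map]
    rfl

-- B's dict, listed out the same way, with the one-pass counter's values
lemma itemsB (s : String) :
    get_dpc_alt s = (PySem.Set.ofList s.toList).flatMap (fun a =>
        ((PySem.Set.ofList s.toList).filter (fun b => decide (b ≠ a))).map (fun b =>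
          (String.ofList [a, b],
            ((s.toList.foldl pvBStep (none, false, PySem.Dict.empty)).2.2).getD
              (String.ofList [a, b]) 0)))
      ++ (PySem.Set.ofList s.toList).map (fun a =>
          (String.ofList [a, a],
            ((s.toList.foldl pvBStep (none, false, PySem.Dict.empty)).2.2).getD
              (String.ofList [a, a]) 0)) := by
  simp only [get_dpc_alt, PySem.List.dedup_eq_ofList]
  have hn : (PySem.Set.ofList s.toList).Nodup := PySem.Set.nodup_ofList s.toList
  set u := PySem.Set.ofList s.toList with hu
  set cnt := (s.toList.foldl pvBStep (none, false, PySem.Dict.empty)).2.2 with hcnt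
  have hinner : ∀ (a : Char) (d : PySem.Dict String Int),
      u.foldl (fun d b =>
        if b ≠ a then d.insert (String.ofList [a, b]) (cnt.getD (String.ofList [a, b]) 0) else d) d
      = ((u.filter (fun b => decide (b ≠ a))).map (fun b => (a, b))).foldl
          (fun d p => d.insert (String.ofList [p.1, p.2])
            (cnt.getD (String.ofList [p.1, p.2]) 0)) d := by
    intro a d
    rw [List.foldl_map, List.foldl_filter]
    simp only [decide_eq_true_eq]
  have houter : u.foldl (fun d a => u.foldl (fun d b =>
        if b ≠ a then d.insert (String.ofList [a, b]) (cnt.getD (String.ofList [a, b]) 0) else d) d)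
        PySem.Dict.empty
      = (u.flatMap (fun a => (u.filter (fun b => decide (b ≠ a))).map (fun b => (a, b)))).foldl
          (fun d p => d.insert (String.ofList [p.1, p.2])
            (cnt.getD (String.ofList [p.1, p.2]) 0)) PySem.Dict.empty := by
    rw [List.foldl_flatMap]
    simp only [hinner]
  rw [houter]
  set pairs := u.flatMap (fun a => (u.filter (fun b => decide (b ≠ a))).map (fun b => (a, b)))
    with hpairs
  have hpk : pairs.map (fun p => String.ofList [p.1, p.2]) = pairKeys u := by
    rw [hpairs, pairKeys, List.map_flatMap]
    refine flatMap_congr_mem _ _ _ ?_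
    intro a _
    rw [List.map_map]
    rfl
  have h1 := PySem.Dict.items_foldl_insert_fresh pairs
    (fun p => String.ofList [p.1, p.2])
    (fun p => cnt.getD (String.ofList [p.1, p.2]) 0) PySem.Dict.empty
    (fun p _ => PySem.Dict.contains_empty _) (by rw [hpk]; exact pairKeys_nodup u hn)
  have hfresh : ∀ a ∈ u, ((pairs.foldl (fun d p => d.insert (String.ofList [p.1, p.2])
      (cnt.getD (String.ofList [p.1, p.2]) 0)) PySem.Dict.empty)).contains
        (String.ofList [a, a]) = false := by
    intro a ha
    rw [← Bool.not_eq_true, PySem.Dict.contains_iff_mem_keys]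
    intro hmem
    simp only [PySem.Dict.keys, h1, List.map_map,
      show (PySem.Dict.empty (κ := String) (ν := Int)).items = [] from rfl,
      List.nil_append] at hmem
    have hmem' : String.ofList [a, a] ∈ pairKeys u := by
      rw [← hpk]
      simpa using hmem
    exact pair_diag_disjoint u _ hmem' (List.mem_map.mpr ⟨a, ha, rfl⟩)
  rw [PySem.Dict.items_foldl_insert_fresh u (fun a => String.ofList [a, a])
    (fun a => cnt.getD (String.ofList [a, a]) 0) _ hfresh (diagKeys_nodup u hn)]
  rw [h1]
  rw [show (PySem.Dict.empty (κ := String) (ν := Int)).items = [] from rfl, List.nil_append]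
  congr 1
  rw [hpairs, List.map_flatMap]
  refine flatMap_congr_mem _ _ _ ?_
  intro a _
  rw [List.map_map]
  rfl

-- ===== VERDICT (by name: the statement is the Claim_ definition above) =====
theorem get_dpc_spec : Claim_equal_get_dpc := by
  intro s _
  unfold Spec_get_dpc
  rw [itemsA, itemsB]
  have hv : ∀ (a b : Char),
      (PySem.Str.count s (String.ofList [a, b]) : Int)
        = ((s.toList.foldl pvBStep (none, false, PySem.Dict.empty)).2.2).getD
            (String.ofList [a, b]) 0 := by
    intro a b
    rw [cnt_getD_eq_count s.toList a b, PySem.Str.count, String.toList_ofList,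
      count_eq_pcnt]
  congr 1
  · refine flatMap_congr_mem _ _ _ ?_
    intro a _
    refine List.map_congr_left ?_
    intro b _
    rw [hv a b]
  · refine List.map_congr_left ?_
    intro a _
    rw [hv a a]
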